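-- pv_equiv track=rewrite | github.com/yongunt/problems | english_to_pig_latin_translator/translator.py | translate_sentence
-- ===== SOURCE A (Python) =====
-- from string import ascii_lowercase as ALP
--
-- VOWELS = "aeiou"
--
-- def first_letter_to_end(word:str):
--     word = list(word)
--
--     if word[0].upper() == word[0]:
--         holder = word[0].lower()
--         del word[0]
--         word[0] = word[0].upper()
--         return "".join(word) + holder
--     else:
--         holder = word[0]
--         del word[0]
--         return "".join(word) + holder
--
-- def translate_word(word:str):
--     if word == "": return ""
--
--     if word[0].lower() not in VOWELS:
--         while word[0].lower() not in VOWELS: word = first_letter_to_end(word)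
--         return word + "ay"
--     else: return word + "yay"
--
-- def translate_sentence(sentence:str):
--     sentence = sentence.split(" ")
--     holder = ""
--     non_letter = ""
--
--     for i in range(len(sentence)):
--         for j in sentence[i]:
--             if j.lower() in ALP: holder+=j
--             else: non_letter+=j
--
--         sentence[i] = translate_word(holder) + non_letter
--
--         holder = ""
--         non_letter = ""
--
--     return " ".join(sentence)
-- ===== SOURCE B (Python) =====
-- VOWELS = "aeiouAEIOU"
--
-- def _pig_letters(ls):
--     # ls: the word's letters only. One pass: find the first vowel, move the
--     # consonant cluster (lowercased) to the end, re-capitalise the new head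
--     # if the cluster carried an upper-case letter.
--     if not ls:
--         return ""
--     i = 0
--     while i < len(ls) and ls[i] not in VOWELS:
--         i += 1
--     if i == 0:
--         return "".join(ls) + "yay"
--     if i == len(ls):
--         # no vowel at all: nothing to rotate, just append "ay"
--         return "".join(ls) + "ay"
--     head = ls[i].upper() if any(c.isupper() for c in ls[:i]) else ls[i]
--     return head + "".join(ls[i + 1:]) + "".join(ls[:i]).lower() + "ay"
--
-- def _pig_word(word):
--     letters = [c for c in word if c.isalpha()]
--     others = [c for c in word if not c.isalpha()]
--     return _pig_letters(letters) + "".join(others)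
--
-- def translate_sentence(sentence):
--     return " ".join(_pig_word(w) for w in sentence.split(" "))
-- ===== Notes on version B (the rewrite author's own statement) =====
-- stated objective: alternative
-- what changed: A pig-latins each word by repeatedly rotating one letter at a time (each rotation rebuilds the word); B finds the first vowel's index in one scan and moves the whole consonant cluster (lowercased, with the capitalisation rule reproduced from the cluster's case) in a single slice-and-concatenate step.
-- outside the precondition, e.g. on translate_sentence('my rhythm'): A does not finish within the time limit, B returns 'myay rhythmay'
import Mathlib
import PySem

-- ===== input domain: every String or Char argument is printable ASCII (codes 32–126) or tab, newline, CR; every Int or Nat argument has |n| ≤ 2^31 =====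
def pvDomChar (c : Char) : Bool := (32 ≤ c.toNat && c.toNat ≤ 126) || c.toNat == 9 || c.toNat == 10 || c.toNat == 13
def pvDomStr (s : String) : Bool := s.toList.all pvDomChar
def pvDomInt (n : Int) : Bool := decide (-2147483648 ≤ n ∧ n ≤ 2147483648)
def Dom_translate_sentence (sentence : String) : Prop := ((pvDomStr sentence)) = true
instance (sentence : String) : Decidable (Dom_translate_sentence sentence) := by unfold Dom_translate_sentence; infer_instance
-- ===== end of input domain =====

-- B replaces A's repeated one-letter rotations by a single find-first-vowel pass
-- that moves the whole consonant cluster at once; equal on every input where A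
-- terminates (Pre_ excludes words whose letters have no vowel, on which A loops
-- forever or raises IndexError).

-- ===== PORT A =====
-- `from string import ascii_lowercase as ALP`
def pvALP : List Char := ['a','b','c','d','e','f','g','h','i','j','k','l','m','n','o','p','q','r','s','t','u','v','w','x','y','z']
-- VOWELS = "aeiou"
def pvVOW : List Char := ['a','e','i','o','u']

-- first_letter_to_end(word)
def pvFle (w : List Char) : List Char :=
  match w with
  | [] => []                      -- Python raises IndexError here (never reached under Pre_)
  | c :: rest =>
    if PySem.Chars.upperChar c == c then   -- word[0].upper() == word[0]
      match rest with
      | [] => []                  -- Python raises IndexError (word[0] after del on a singleton)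
      | d :: rest' => (PySem.Chars.upperChar d :: rest') ++ [PySem.Chars.lowerChar c]
    else rest ++ [c]

-- word[0].lower() in VOWELS (False on the empty word, where Python would raise)
def pvHeadVowel (w : List Char) : Bool :=
  match w with
  | [] => false
  | c :: _ => pvVOW.contains (PySem.Chars.lowerChar c)

-- the `while` loop of translate_word; fuel w.length bounds the rotations the loop
-- performs whenever it terminates (at most length-1), so inside Pre_ this is exact
def pvRot : Nat → List Char → List Char
  | 0, w => w
  | n + 1, w => if pvHeadVowel w then w else pvRot n (pvFle w)

-- translate_word(word)
def pvTranslateWord (w : List Char) : List Char :=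
  if w = [] then []
  else if pvHeadVowel w = false then pvRot w.length w ++ ['a', 'y']
  else w ++ ['y', 'a', 'y']

-- the inner `for j in sentence[i]` loop building (holder, non_letter)
def pvScan (w : List Char) : List Char × List Char :=
  w.foldl
    (fun p j =>
      if pvALP.contains (PySem.Chars.lowerChar j) then (p.1 ++ [j], p.2)
      else (p.1, p.2 ++ [j]))
    ([], [])

-- one iteration of the `for i in range(len(sentence))` loop
def pvProcA (w : List Char) : List Char :=
  pvTranslateWord (pvScan w).1 ++ (pvScan w).2

def translate_sentence (sentence : String) : String :=
  String.mk (PySem.Chars.join [' '] ((PySem.Chars.splitOn sentence.toList [' ']).map pvProcA))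

-- ===== PORT B =====
def pvIsVowelB (c : Char) : Bool := ['a','e','i','o','u','A','E','I','O','U'].contains c

-- the `while i < len(ls) and ls[i] not in VOWELS: i += 1` loop of _pig_letters
def pvIdxLoop : List Char → Nat
  | [] => 0
  | c :: t => if pvIsVowelB c then 0 else pvIdxLoop t + 1

-- _pig_letters(ls); ls[:i] / ls[i+1:] are take/drop (0 ≤ i ≤ len, exact)
def pvPigLetters (ls : List Char) : List Char :=
  if ls = [] then []
  else
    let i := pvIdxLoop ls
    if i = 0 then ls ++ ['y', 'a', 'y']
    else if i = ls.length then ls ++ ['a', 'y']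
    else
      let head := if (ls.take i).any PySem.Chars.isupper
                  then PySem.Chars.upperChar (ls.getD i ' ') else ls.getD i ' '  -- ls[i]: i < len in this branch
      head :: (ls.drop (i + 1) ++ (PySem.Chars.lower (ls.take i) ++ ['a', 'y']))

-- _pig_word(word)
def pvProcB (w : List Char) : List Char :=
  pvPigLetters (w.filter PySem.Chars.isalpha) ++ w.filter (fun c => !PySem.Chars.isalpha c)

def translate_sentence_alt (sentence : String) : String :=
  String.mk (PySem.Chars.join [' '] ((PySem.Chars.splitOn sentence.toList [' ']).map pvProcB))

-- ===== PRECONDITION & SPEC =====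
-- Pre_ excludes sentences containing a word whose letters are all non-vowels: on those
-- A never returns (its rotation loop cycles forever, or raises IndexError on a single
-- uppercase consonant); it is exactly A's termination domain.
def Pre_translate_sentence (sentence : String) : Prop :=
  ((PySem.Chars.splitOn sentence.toList [' ']).all (fun w =>
    (w.filter (fun c => decide (('A' ≤ c ∧ c ≤ 'Z') ∨ ('a' ≤ c ∧ c ≤ 'z')))).isEmpty ||
    (w.filter (fun c => decide (('A' ≤ c ∧ c ≤ 'Z') ∨ ('a' ≤ c ∧ c ≤ 'z')))).any
      (fun c => (['a','e','i','o','u','A','E','I','O','U'] : List Char).contains c))) = true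
instance (sentence : String) : Decidable (Pre_translate_sentence sentence) := by
  unfold Pre_translate_sentence; infer_instance

def pvWitness_translate_sentence : String := "Hi"

def Spec_translate_sentence (sentence : String) (out : String) : Prop := out = translate_sentence_alt sentence
instance (sentence : String) (out : String) : Decidable (Spec_translate_sentence sentence out) := by unfold Spec_translate_sentence; infer_instance

-- ===== CLAIM (what is proved, stated in full; the proofs are below) =====
def Claim_equal_translate_sentence : Prop := ∀ (sentence : String), Dom_translate_sentence sentence → Pre_translate_sentence sentence → Spec_translate_sentence sentence (translate_sentence sentence)

-- ===== LEMMAS AND PROOFS =====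

-- Char order/equality as toNat facts
lemma pv_le_iff (a b : Char) : (a ≤ b) ↔ a.toNat ≤ b.toNat :=
  ⟨fun h => Char.le_def.mp h, fun h => Char.le_def.mpr h⟩
lemma pv_eq_iff (a b : Char) : (a = b) ↔ a.toNat = b.toNat := eq_iff_eq_of_cmp_eq_cmp rfl

lemma pv_toNat_lowerChar (c : Char) :
    (PySem.Chars.lowerChar c).toNat = if 65 ≤ c.toNat ∧ c.toNat ≤ 90 then c.toNat + 32 else c.toNat := by
  simp only [PySem.Chars.lowerChar, PySem.Chars.isupper, pv_le_iff]
  by_cases h : 65 ≤ c.toNat ∧ c.toNat ≤ 90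
  · rw [if_pos, if_pos h, Char.toNat_ofNat, if_pos (Or.inl (by omega))]
    simpa using h
  · rw [if_neg, if_neg h]
    simpa using h

lemma pv_toNat_upperChar (c : Char) :
    (PySem.Chars.upperChar c).toNat = if 97 ≤ c.toNat ∧ c.toNat ≤ 122 then c.toNat - 32 else c.toNat := by
  simp only [PySem.Chars.upperChar, PySem.Chars.islower, pv_le_iff]
  by_cases h : 97 ≤ c.toNat ∧ c.toNat ≤ 122
  · rw [if_pos, if_pos h, Char.toNat_ofNat, if_pos (Or.inl (by omega))]
    simpa using h
  · rw [if_neg, if_neg h]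
    simpa using h

-- A's letter test equals B's
lemma pv_letter_eq (c : Char) : pvALP.contains (PySem.Chars.lowerChar c) = PySem.Chars.isalpha c := by
  have h := pv_toNat_lowerChar c
  rw [Bool.eq_iff_iff]
  simp only [pvALP, PySem.Chars.isalpha, PySem.Chars.isupper, PySem.Chars.islower, pv_le_iff,
    List.contains_eq_mem, List.mem_cons, pv_eq_iff, List.not_mem_nil, Bool.or_eq_true,
    Bool.and_eq_true, decide_eq_true_eq, or_false]
  simp only [show ('a'.toNat = 97) from rfl, show ('b'.toNat = 98) from rfl, show ('c'.toNat = 99) from rfl, show ('d'.toNat = 100) from rfl, show ('e'.toNat = 101) from rfl, show ('f'.toNat = 102) from rfl, show ('g'.toNat = 103) from rfl, show ('h'.toNat = 104) from rfl, show ('i'.toNat = 105) from rfl, show ('j'.toNat = 106) from rfl, show ('k'.toNat = 107) from rfl, show ('l'.toNat = 108) from rfl, show ('m'.toNat = 109) from rfl, show ('n'.toNat = 110) from rfl, show ('o'.toNat = 111) from rfl, show ('p'.toNat = 112) from rfl, show ('q'.toNat = 113) from rfl, show ('r'.toNat = 114) from rfl, show ('s'.toNat = 115) from rfl, show ('t'.toNat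 = 116) from rfl, show ('u'.toNat = 117) from rfl, show ('v'.toNat = 118) from rfl, show ('w'.toNat = 119) from rfl, show ('x'.toNat = 120) from rfl, show ('y'.toNat = 121) from rfl, show ('z'.toNat = 122) from rfl, show ('A'.toNat = 65) from rfl, show ('E'.toNat = 69) from rfl, show ('I'.toNat = 73) from rfl, show ('O'.toNat = 79) from rfl, show ('U'.toNat = 85) from rfl, show ('Z'.toNat = 90) from rfl] at *
  split_ifs at h <;> omega

-- A's vowel test equals B's
lemma pv_vowel_eq (c : Char) : pvVOW.contains (PySem.Chars.lowerChar c) = pvIsVowelB c := by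
  have h := pv_toNat_lowerChar c
  rw [Bool.eq_iff_iff]
  simp only [pvVOW, pvIsVowelB, List.contains_eq_mem, List.mem_cons, pv_eq_iff,
    List.not_mem_nil, or_false, decide_eq_true_eq]
  simp only [show ('a'.toNat = 97) from rfl, show ('b'.toNat = 98) from rfl, show ('c'.toNat = 99) from rfl, show ('d'.toNat = 100) from rfl, show ('e'.toNat = 101) from rfl, show ('f'.toNat = 102) from rfl, show ('g'.toNat = 103) from rfl, show ('h'.toNat = 104) from rfl, show ('i'.toNat = 105) from rfl, show ('j'.toNat = 106) from rfl, show ('k'.toNat = 107) from rfl, show ('l'.toNat = 108) from rfl, show ('m'.toNat = 109) from rfl, show ('n'.toNat = 110) from rfl, show ('o'.toNat = 111) from rfl, show ('p'.toNat = 112) from rfl, show ('q'.toNat = 113) from rfl, show ('r'.toNat = 114) from rfl, show ('s'.toNat = 115) from rfl, show ('t'.toNat = 116) from rfl, show ('u'.toNat = 117) from rfl, show ('v'.toNat = 118) from rfl, show ('w'.toNat = 119) from rfl, show ('x'.toNat = 120) from rfl, show ('y'.toNat = 121) from rfl, show ('z'.toNat = 122) from rfl, show ('A'.toNat = 65) from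 rfl, show ('E'.toNat = 69) from rfl, show ('I'.toNat = 73) from rfl, show ('O'.toNat = 79) from rfl, show ('U'.toNat = 85) from rfl, show ('Z'.toNat = 90) from rfl] at *
  split_ifs at h <;> omega

-- A's test for a letter alphabetic-ness in Pre_ equals isalpha
lemma pv_pre_letter_eq (c : Char) :
    decide (('A' ≤ c ∧ c ≤ 'Z') ∨ ('a' ≤ c ∧ c ≤ 'z')) = PySem.Chars.isalpha c := by
  rw [Bool.eq_iff_iff]
  simp only [PySem.Chars.isalpha, PySem.Chars.isupper, PySem.Chars.islower, pv_le_iff,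
    Bool.or_eq_true, Bool.and_eq_true, decide_eq_true_eq]

lemma pv_vowelB_mem (c : Char) :
    (c ∈ (['a','e','i','o','u','A','E','I','O','U'] : List Char)) ↔ pvIsVowelB c = true := by
  simp [pvIsVowelB]

-- A's capitalisation test equals isupper on letters
lemma pv_uptest_eq (c : Char) (h : PySem.Chars.isalpha c = true) :
    (PySem.Chars.upperChar c == c) = PySem.Chars.isupper c := by
  have hu := pv_toNat_upperChar c
  rw [Bool.eq_iff_iff]
  simp only [PySem.Chars.isalpha, PySem.Chars.isupper, PySem.Chars.islower, pv_le_iff,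
    Bool.or_eq_true, Bool.and_eq_true, decide_eq_true_eq, beq_iff_eq, pv_eq_iff] at h ⊢
  simp only [show ('a'.toNat = 97) from rfl, show ('b'.toNat = 98) from rfl, show ('c'.toNat = 99) from rfl, show ('d'.toNat = 100) from rfl, show ('e'.toNat = 101) from rfl, show ('f'.toNat = 102) from rfl, show ('g'.toNat = 103) from rfl, show ('h'.toNat = 104) from rfl, show ('i'.toNat = 105) from rfl, show ('j'.toNat = 106) from rfl, show ('k'.toNat = 107) from rfl, show ('l'.toNat = 108) from rfl, show ('m'.toNat = 109) from rfl, show ('n'.toNat = 110) from rfl, show ('o'.toNat = 111) from rfl, show ('p'.toNat = 112) from rfl, show ('q'.toNat = 113) from rfl, show ('r'.toNat = 114) from rfl, show ('s'.toNat = 115) from rfl, show ('t'.toNat = 116) from rfl, show ('u'.toNat = 117) from rfl, show ('v'.toNat = 118) from rfl, show ('w'.toNat = 119) from rfl, show ('x'.toNat = 120) from rfl, show ('y'.toNat = 121) from rfl, show ('z'.toNat = 122) from rfl, show ('A'.toNat = 65) from rfl, show ('E'.toNat = 69) from rfl, show ('I'.toNat = 73) from rfl, show ('O'.toNat = 79)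 from rfl, show ('U'.toNat = 85) from rfl, show ('Z'.toNat = 90) from rfl] at h ⊢
  split_ifs at hu <;> omega

lemma pv_uptest_false_lower (c : Char) (h : (PySem.Chars.upperChar c == c) = false) :
    PySem.Chars.lowerChar c = c := by
  have hu := pv_toNat_upperChar c
  have hl := pv_toNat_lowerChar c
  simp only [beq_eq_false_iff_ne, ne_eq, pv_eq_iff] at h
  rw [pv_eq_iff]
  split_ifs at hu hl <;> omega

lemma pv_lower_upperChar (c : Char) :
    PySem.Chars.lowerChar (PySem.Chars.upperChar c) = PySem.Chars.lowerChar c := by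
  have hu := pv_toNat_upperChar c
  have hl := pv_toNat_lowerChar c
  have hl2 := pv_toNat_lowerChar (PySem.Chars.upperChar c)
  rw [pv_eq_iff]
  split_ifs at hu hl hl2 <;> omega

lemma pv_vowelB_upperChar (c : Char) : pvIsVowelB (PySem.Chars.upperChar c) = pvIsVowelB c := by
  have hu := pv_toNat_upperChar c
  rw [Bool.eq_iff_iff]
  simp only [pvIsVowelB, List.contains_eq_mem, List.mem_cons, pv_eq_iff, List.not_mem_nil,
    or_false, decide_eq_true_eq]
  simp only [show ('a'.toNat = 97) from rfl, show ('b'.toNat = 98) from rfl, show ('c'.toNat = 99) from rfl, show ('d'.toNat = 100) from rfl, show ('e'.toNat = 101) from rfl, show ('f'.toNat = 102) from rfl, show ('g'.toNat = 103) from rfl, show ('h'.toNat = 104) from rfl, show ('i'.toNat = 105) from rfl, show ('j'.toNat = 106) from rfl, show ('k'.toNat = 107) from rfl, show ('l'.toNat = 108) from rfl, show ('m'.toNat = 109) from rfl, show ('n'.toNat = 110) from rfl, show ('o'.toNat = 111) from rfl, show ('p'.toNat = 112) from rfl, show ('q'.toNat = 113) from rfl, show ('r'.toNat = 114) from rfl,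 show ('s'.toNat = 115) from rfl, show ('t'.toNat = 116) from rfl, show ('u'.toNat = 117) from rfl, show ('v'.toNat = 118) from rfl, show ('w'.toNat = 119) from rfl, show ('x'.toNat = 120) from rfl, show ('y'.toNat = 121) from rfl, show ('z'.toNat = 122) from rfl, show ('A'.toNat = 65) from rfl, show ('E'.toNat = 69) from rfl, show ('I'.toNat = 73) from rfl, show ('O'.toNat = 79) from rfl, show ('U'.toNat = 85) from rfl, show ('Z'.toNat = 90) from rfl]
  split_ifs at hu <;> omega

lemma pv_isalpha_upperChar (c : Char) :
    PySem.Chars.isalpha (PySem.Chars.upperChar c) = PySem.Chars.isalpha c := by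
  have hu := pv_toNat_upperChar c
  rw [Bool.eq_iff_iff]
  simp only [PySem.Chars.isalpha, PySem.Chars.isupper, PySem.Chars.islower, pv_le_iff,
    Bool.or_eq_true, Bool.and_eq_true, decide_eq_true_eq]
  simp only [show ('a'.toNat = 97) from rfl, show ('b'.toNat = 98) from rfl, show ('c'.toNat = 99) from rfl, show ('d'.toNat = 100) from rfl, show ('e'.toNat = 101) from rfl, show ('f'.toNat = 102) from rfl, show ('g'.toNat = 103) from rfl, show ('h'.toNat = 104) from rfl, show ('i'.toNat = 105) from rfl, show ('j'.toNat = 106) from rfl, show ('k'.toNat = 107) from rfl, show ('l'.toNat = 108) from rfl, show ('m'.toNat = 109) from rfl, show ('n'.toNat = 110) from rfl, show ('o'.toNat = 111) from rfl, show ('p'.toNat = 112) from rfl, show ('q'.toNat = 113) from rfl, show ('r'.toNat = 114) from rfl, show ('s'.toNat = 115) from rfl, show ('t'.toNat = 116) from rfl, show ('u'.toNat = 117) from rfl, show ('v'.toNat = 118) from rfl, show ('w'.toNat = 119) from rfl, show ('x'.toNat = 120) from rfl, show ('y'.toNat = 121) from rfl, show ('z'.toNat = 122) from rfl, show ('A'.toNat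 = 65) from rfl, show ('E'.toNat = 69) from rfl, show ('I'.toNat = 73) from rfl, show ('O'.toNat = 79) from rfl, show ('U'.toNat = 85) from rfl, show ('Z'.toNat = 90) from rfl]
  split_ifs at hu <;> omega

lemma pv_isupper_upperChar (c : Char) (h : PySem.Chars.isalpha c = true) :
    PySem.Chars.isupper (PySem.Chars.upperChar c) = true := by
  have hu := pv_toNat_upperChar c
  simp only [PySem.Chars.isalpha, PySem.Chars.isupper, PySem.Chars.islower, pv_le_iff,
    Bool.or_eq_true, Bool.and_eq_true, decide_eq_true_eq] at h ⊢
  simp only [show ('a'.toNat = 97) from rfl, show ('b'.toNat = 98) from rfl, show ('c'.toNat = 99) from rfl, show ('d'.toNat = 100) from rfl, show ('e'.toNat = 101) from rfl, show ('f'.toNat = 102) from rfl, show ('g'.toNat = 103) from rfl, show ('h'.toNat = 104) from rfl, show ('i'.toNat = 105) from rfl, show ('j'.toNat = 106) from rfl, show ('k'.toNat = 107) from rfl, show ('l'.toNat = 108) from rfl, show ('m'.toNat = 109) from rfl, show ('n'.toNat = 110) from rfl, show ('o'.toNat = 111) from rfl, show ('p'.toNat = 112) from rfl, show ('q'.toNat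 = 113) from rfl, show ('r'.toNat = 114) from rfl, show ('s'.toNat = 115) from rfl, show ('t'.toNat = 116) from rfl, show ('u'.toNat = 117) from rfl, show ('v'.toNat = 118) from rfl, show ('w'.toNat = 119) from rfl, show ('x'.toNat = 120) from rfl, show ('y'.toNat = 121) from rfl, show ('z'.toNat = 122) from rfl, show ('A'.toNat = 65) from rfl, show ('E'.toNat = 69) from rfl, show ('I'.toNat = 73) from rfl, show ('O'.toNat = 79) from rfl, show ('U'.toNat = 85) from rfl, show ('Z'.toNat = 90) from rfl] at h ⊢
  split_ifs at hu <;> omega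

-- the scan loop is a pair of filters
lemma pv_scan_go (w : List Char) : ∀ (a b : List Char),
    w.foldl
      (fun p j => if PySem.Chars.isalpha j then (p.1 ++ [j], p.2) else (p.1, p.2 ++ [j])) (a, b)
      = (a ++ w.filter PySem.Chars.isalpha, b ++ w.filter (fun c => !PySem.Chars.isalpha c)) := by
  induction w with
  | nil => intro a b; simp
  | cons c t ih =>
    intro a b
    by_cases h : PySem.Chars.isalpha c = true
    · simp [h, ih]
    · simp [h, ih]

lemma pv_scan_eq (w : List Char) :
    pvScan w = (w.filter PySem.Chars.isalpha, w.filter (fun c => !PySem.Chars.isalpha c)) := by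
  unfold pvScan
  rw [show (fun (p : List Char × List Char) j =>
      if pvALP.contains (PySem.Chars.lowerChar j) then (p.1 ++ [j], p.2)
      else (p.1, p.2 ++ [j]))
    = (fun (p : List Char × List Char) j =>
      if PySem.Chars.isalpha j then (p.1 ++ [j], p.2) else (p.1, p.2 ++ [j])) from
    funext fun p => funext fun j => by rw [pv_letter_eq]]
  simpa using pv_scan_go w [] []

-- index-loop facts
lemma pv_idx_take (ls : List Char) : ∀ c ∈ ls.take (pvIdxLoop ls), pvIsVowelB c = false := by
  induction ls with
  | nil => simp
  | cons c t ih =>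
    simp only [pvIdxLoop]
    by_cases h : pvIsVowelB c = true
    · simp [h]
    · rw [if_neg h]
      intro x hx
      rcases List.mem_cons.mp (by simpa using hx) with h1 | h1
      · subst h1; simpa using h
      · exact ih x h1

lemma pv_idx_lt (ls : List Char) (h : ∃ c ∈ ls, pvIsVowelB c = true) :
    pvIdxLoop ls < ls.length := by
  induction ls with
  | nil => simp at h
  | cons c t ih =>
    simp only [pvIdxLoop, List.length_cons]
    by_cases hc : pvIsVowelB c = true
    · simp [hc]
    · rw [if_neg hc]
      have ht : ∃ x ∈ t, pvIsVowelB x = true := by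
        rcases h with ⟨x, hx, hv⟩
        rcases List.mem_cons.mp hx with h1 | h1
        · subst h1; exact absurd hv hc
        · exact ⟨x, h1, hv⟩
      have := ih ht
      omega

lemma pv_idx_get (ls : List Char) (h : pvIdxLoop ls < ls.length) :
    pvIsVowelB (ls.getD (pvIdxLoop ls) ' ') = true := by
  induction ls with
  | nil => simp at h
  | cons c t ih =>
    by_cases hc : pvIsVowelB c = true
    · simp [pvIdxLoop, hc]
    · have hr : pvIdxLoop (c :: t) = pvIdxLoop t + 1 := by simp [pvIdxLoop, hc]
      rw [hr] at h ⊢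
      simp only [List.length_cons] at h
      simpa using ih (by omega)

-- the loop stops as soon as a vowel is in front
lemma pv_rot_of_head (w : List Char) (h : pvHeadVowel w = true) : ∀ n, pvRot n w = w := by
  intro n
  cases n with
  | zero => rfl
  | succ m => simp [pvRot, h]

lemma pv_head_vowel_cons (c : Char) (t : List Char) :
    pvHeadVowel (c :: t) = pvIsVowelB c := pv_vowel_eq c

lemma pv_rot_step (m : Nat) (w : List Char) (h : pvHeadVowel w = false) :
    pvRot (m + 1) w = pvRot m (pvFle w) := by
  simp [pvRot, h]

lemma pvFle_cons_up (c d : Char) (t : List Char) (h : (PySem.Chars.upperChar c == c) = true) :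
    pvFle (c :: d :: t) = (PySem.Chars.upperChar d :: t) ++ [PySem.Chars.lowerChar c] := by
  simp [pvFle, h]

lemma pvFle_cons_low (c : Char) (t : List Char) (h : (PySem.Chars.upperChar c == c) = false) :
    pvFle (c :: t) = t ++ [c] := by
  simp [pvFle, h]

-- the rotation loop in closed form: the non-vowel prefix p moves to the end lowercased,
-- the first vowel is uppercased iff p carried an uppercase letter
lemma pv_rot_closed (k : Nat) : ∀ (p : List Char), p.length = k →
    ∀ (v : Char) (rest moved : List Char) (n : Nat), p.length ≤ n →
    (∀ c ∈ p, PySem.Chars.isalpha c = true) →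
    (∀ c ∈ p, pvIsVowelB c = false) →
    pvIsVowelB v = true →
    pvRot n (p ++ v :: rest ++ moved) =
      (if p.any PySem.Chars.isupper then PySem.Chars.upperChar v else v) ::
        (rest ++ moved ++ p.map PySem.Chars.lowerChar) := by
  induction k with
  | zero =>
    intro p hp v rest moved n _ _ _ hv
    obtain rfl := List.length_eq_zero_iff.mp hp
    have h1 : pvHeadVowel (v :: (rest ++ moved)) = true := by
      rw [pv_head_vowel_cons]; exact hv
    simpa using pv_rot_of_head _ h1 n
  | succ k ih =>
    intro p hp v rest moved n hn halpha hnv hv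
    match p, hp with
    | c :: p', hp =>
      have hp' : p'.length = k := by simpa using hp
      have hlen : p'.length ≤ n - 1 := by simp at hp hn ⊢; omega
      obtain ⟨m, rfl⟩ : ∃ m, n = m + 1 := ⟨n - 1, by simp at hn; omega⟩
      have hcv : pvIsVowelB c = false := hnv c (by simp)
      have hca : PySem.Chars.isalpha c = true := halpha c (by simp)
      rw [List.cons_append, List.cons_append]
      rw [pv_rot_step m (c :: (p' ++ v :: rest ++ moved))
        (by rw [pv_head_vowel_cons]; exact hcv)]
      by_cases hup : (PySem.Chars.upperChar c == c) = true
      · -- A lowercases c, moves it back and uppercases the new front letter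
        have hcu : PySem.Chars.isupper c = true := by rw [← pv_uptest_eq c hca]; exact hup
        match p' with
        | [] =>
          rw [show ([] : List Char) ++ v :: rest ++ moved = v :: (rest ++ moved) by simp,
            pvFle_cons_up c v (rest ++ moved) hup]
          have h1 : pvHeadVowel ((PySem.Chars.upperChar v :: (rest ++ moved))
              ++ [PySem.Chars.lowerChar c]) = true := by
            rw [List.cons_append, pv_head_vowel_cons, pv_vowelB_upperChar]; exact hv
          rw [pv_rot_of_head _ h1]
          simp [hcu]
        | d :: p'' =>
          rw [show (d :: p'') ++ v :: rest ++ moved = d :: (p'' ++ v :: rest ++ moved) by simp,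
            pvFle_cons_up c d _ hup]
          have hda : PySem.Chars.isalpha d = true := halpha d (by simp)
          have heq : PySem.Chars.upperChar d :: (p'' ++ v :: rest ++ moved)
              ++ [PySem.Chars.lowerChar c]
              = (PySem.Chars.upperChar d :: p'') ++ v :: rest
                ++ (moved ++ [PySem.Chars.lowerChar c]) := by
            simp
          rw [heq, ih (PySem.Chars.upperChar d :: p'') (by simpa using hp') v rest
            (moved ++ [PySem.Chars.lowerChar c]) m
            (by simp at hp hn ⊢; omega)
            (by intro x hx
                rcases List.mem_cons.mp hx with h1 | h1
                · subst h1; rw [pv_isalpha_upperChar]; exact hda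
                · exact halpha x (by simp [h1]))
            (by intro x hx
                rcases List.mem_cons.mp hx with h1 | h1
                · subst h1; rw [pv_vowelB_upperChar]; exact hnv d (by simp)
                · exact hnv x (by simp [h1]))
            hv]
          have hdu : PySem.Chars.isupper (PySem.Chars.upperChar d) = true :=
            pv_isupper_upperChar d hda
          simp [hcu, hdu, pv_lower_upperChar]
      · -- c stays as it is and moves to the end
        have hcl : PySem.Chars.lowerChar c = c :=
          pv_uptest_false_lower c (by simpa using hup)
        have hcu : PySem.Chars.isupper c = false := by
          rw [← pv_uptest_eq c hca]; simpa using hup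
        rw [pvFle_cons_low c _ (by simpa using hup)]
        have heq : (p' ++ v :: rest ++ moved) ++ [c]
            = p' ++ v :: rest ++ (moved ++ [c]) := by simp
        rw [heq, ih p' hp' v rest (moved ++ [c]) m
          (by simp at hp hn ⊢; omega)
          (fun x hx => halpha x (by simp [hx]))
          (fun x hx => hnv x (by simp [hx])) hv]
        simp [hcu, hcl]

-- per-word: translate_word on the letters equals _pig_letters
lemma pv_word_eq (ls : List Char)
    (halpha : ∀ c ∈ ls, PySem.Chars.isalpha c = true)
    (hpre : ls = [] ∨ ∃ c ∈ ls, pvIsVowelB c = true) :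
    pvTranslateWord ls = pvPigLetters ls := by
  rcases hpre with rfl | hex
  · simp [pvTranslateWord, pvPigLetters]
  · have hne : ls ≠ [] := by rintro rfl; simp at hex
    match ls, hne with
    | c :: t, _ =>
      by_cases hc : pvIsVowelB c = true
      · -- the word starts with a vowel: both sides append "yay"
        have hi0 : pvIdxLoop (c :: t) = 0 := by simp [pvIdxLoop, hc]
        rw [pvTranslateWord, if_neg (by simp), if_neg (by rw [pv_head_vowel_cons, hc]; simp),
          pvPigLetters, if_neg (by simp)]
        simp [hi0]
      · -- the word starts with a consonant: A rotates, B moves the cluster at once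
        have hcb : pvIsVowelB c = false := by simpa using hc
        set ls := c :: t with hls
        set i := pvIdxLoop ls with hi
        have hi0 : i ≠ 0 := by rw [hi, hls]; simp [pvIdxLoop, hcb]
        have hlt : i < ls.length := pv_idx_lt ls hex
        have hvow : pvIsVowelB ls[i] = true := by
          have := pv_idx_get ls hlt
          rwa [List.getD_eq_getElem ls ' ' hlt] at this
        have htlen : (ls.take i).length = i := by simp; omega
        have hsplit : ls.take i ++ ls[i] :: ls.drop (i + 1) ++ [] = ls := by
          rw [List.append_nil, ← List.drop_eq_getElem_cons hlt, List.take_append_drop]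
        have hrot := pv_rot_closed i (ls.take i) htlen ls[i] (ls.drop (i + 1)) []
          ls.length (by omega)
          (fun x hx => halpha x (List.mem_of_mem_take hx))
          (pv_idx_take ls) hvow
        rw [hsplit] at hrot
        rw [pvTranslateWord, if_neg (show ¬(ls = []) from by simp [hls]),
          if_pos (show pvHeadVowel ls = false from by rw [hls, pv_head_vowel_cons]; exact hcb),
          hrot, pvPigLetters, if_neg (show ¬(ls = []) from by simp [hls])]
        rw [← hi]
        rw [if_neg hi0, if_neg (show ¬(i = ls.length) from by omega)]
        rw [List.getD_eq_getElem ls ' ' hlt]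
        simp only [PySem.Chars.lower, List.append_nil, List.append_assoc, List.cons_append]

-- per-word: the two loop bodies agree
lemma pv_proc_eq (w : List Char)
    (hpre : w.filter (fun c => decide (('A' ≤ c ∧ c ≤ 'Z') ∨ ('a' ≤ c ∧ c ≤ 'z'))) = [] ∨
      ∃ c ∈ w.filter (fun c => decide (('A' ≤ c ∧ c ≤ 'Z') ∨ ('a' ≤ c ∧ c ≤ 'z'))),
        c ∈ (['a','e','i','o','u','A','E','I','O','U'] : List Char)) :
    pvProcA w = pvProcB w := by
  have hf : w.filter (fun c => decide (('A' ≤ c ∧ c ≤ 'Z') ∨ ('a' ≤ c ∧ c ≤ 'z')))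
      = w.filter PySem.Chars.isalpha := by
    apply List.filter_congr
    intro c _
    exact pv_pre_letter_eq c
  rw [hf] at hpre
  unfold pvProcA pvProcB
  rw [pv_scan_eq]
  have halpha : ∀ c ∈ w.filter PySem.Chars.isalpha, PySem.Chars.isalpha c = true := by
    intro c hc
    exact (List.mem_filter.mp hc).2
  have hpre' : w.filter PySem.Chars.isalpha = [] ∨
      ∃ c ∈ w.filter PySem.Chars.isalpha, pvIsVowelB c = true := by
    rcases hpre with h | ⟨c, hc, hm⟩
    · exact Or.inl h
    · exact Or.inr ⟨c, hc, (pv_vowelB_mem c).mp hm⟩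
  rw [pv_word_eq _ halpha hpre']

-- ===== VERDICT (by name: the statement is the Claim_ definition above) =====
theorem translate_sentence_spec : Claim_equal_translate_sentence := by
  intro s _ hpre
  unfold Pre_translate_sentence at hpre
  rw [List.all_eq_true] at hpre
  unfold Spec_translate_sentence translate_sentence translate_sentence_alt
  congr 1
  congr 1
  apply List.map_congr_left
  intro w hw
  apply pv_proc_eq w
  have h := hpre w hw
  simp only [Bool.or_eq_true, List.isEmpty_iff, List.any_eq_true,
    List.contains_eq_mem, decide_eq_true_eq] at h
  exact h
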